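-- pv_equiv track=rewrite | github.com/AngierRomain/Python | echiquier 2 mai 2019.py | fou
-- ===== SOURCE A (Python) =====
-- def init():
--     return [[0 for i in range(8)]for j in range(8)]
--
-- def fou(lig, col):
--     M = init()
--     for i in range(len(M)):
--         for j in range(len(M)):
--             if i+j == col+lig or i-j == lig-col:
--                 M[i][j] = 1
--     M[lig][col]=3
--     return M
-- ===== SOURCE B (Python) =====
-- def fou(lig, col):
--     M = [[0] * 8 for _ in range(8)]
--     s = lig + col
--     for i in range(max(0, s - 7), min(7, s) + 1):
--         M[i][s - i] = 1
--     d = lig - col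
--     for i in range(max(0, d), min(7, 7 + d) + 1):
--         M[i][i - d] = 1
--     M[lig][col] = 3
--     return M
-- ===== Notes on version B (the rewrite author's own statement) =====
-- stated objective: alternative
-- what changed: B builds the board by directly walking the two diagonals i+j=lig+col and i-j=lig-col (clamped to 0..7) instead of A's scan over all 64 cells testing each against the diagonal equations; the final M[lig][col]=3 overwrite is the same.
import Mathlib
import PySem

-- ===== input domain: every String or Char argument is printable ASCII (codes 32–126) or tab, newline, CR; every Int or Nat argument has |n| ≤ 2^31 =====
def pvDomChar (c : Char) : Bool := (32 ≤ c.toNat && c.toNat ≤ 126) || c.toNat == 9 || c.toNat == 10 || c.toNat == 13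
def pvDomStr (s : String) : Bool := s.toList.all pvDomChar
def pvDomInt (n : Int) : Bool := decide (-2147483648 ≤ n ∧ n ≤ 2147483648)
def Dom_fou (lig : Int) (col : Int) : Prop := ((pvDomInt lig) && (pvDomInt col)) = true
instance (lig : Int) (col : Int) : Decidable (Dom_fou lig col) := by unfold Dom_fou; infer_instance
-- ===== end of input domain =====

-- B replaces A's 64-cell scan-and-test with direct walks along the two diagonals through (lig,col): an alternative construction of the same board.

-- ===== PORT A =====
-- init(): [[0 for i in range(8)] for j in range(8)]
def fouInit : List (List Int) :=
  (PySem.List.pyRange 0 8 1).map (fun _ => (PySem.List.pyRange 0 8 1).map (fun _ => (0 : Int)))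

def fou (lig : Int) (col : Int) : List (List Int) :=
  let M := fouInit
  let M := (PySem.List.pyRange 0 (M.length : Int) 1).foldl (fun M i =>
    (PySem.List.pyRange 0 (M.length : Int) 1).foldl (fun M j =>
      if i + j == col + lig || i - j == lig - col then
        PySem.List.pySetD M i (PySem.List.pySetD (PySem.List.pyGetD M i []) j 1)
      else M) M) M
  PySem.List.pySetD M lig (PySem.List.pySetD (PySem.List.pyGetD M lig []) col 3)

-- ===== PORT B =====
def fou_alt (lig : Int) (col : Int) : List (List Int) :=
  let M := (PySem.List.pyRange 0 8 1).map (fun _ => List.replicate 8 (0 : Int))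
  let s := lig + col
  let M := (PySem.List.pyRange (max 0 (s - 7)) (min 7 s + 1) 1).foldl (fun M i =>
    PySem.List.pySetD M i (PySem.List.pySetD (PySem.List.pyGetD M i []) (s - i) 1)) M
  let d := lig - col
  let M := (PySem.List.pyRange (max 0 d) (min 7 (7 + d) + 1) 1).foldl (fun M i =>
    PySem.List.pySetD M i (PySem.List.pySetD (PySem.List.pyGetD M i []) (i - d) 1)) M
  PySem.List.pySetD M lig (PySem.List.pySetD (PySem.List.pyGetD M lig []) col 3)

-- ===== PRECONDITION & SPEC =====
-- Pre_: exactly the inputs on which A returns; outside it the final M[lig][col] = 3 raises IndexError.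
def Pre_fou (lig : Int) (col : Int) : Prop :=
  -8 ≤ lig ∧ lig < 8 ∧ -8 ≤ col ∧ col < 8
instance (lig : Int) (col : Int) : Decidable (Pre_fou lig col) := by unfold Pre_fou; infer_instance

def pvWitness_fou : Int × Int := (3, 5)

def Spec_fou (lig : Int) (col : Int) (out : List (List Int)) : Prop := out = fou_alt lig col
instance (lig : Int) (col : Int) (out : List (List Int)) : Decidable (Spec_fou lig col out) := by unfold Spec_fou; infer_instance

-- ===== CLAIM (what is proved, stated in full; the proofs are below) =====
def Claim_equal_fou : Prop := ∀ (lig : Int) (col : Int), Dom_fou lig col → Pre_fou lig col → Spec_fou lig col (fou lig col)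

-- ===== LEMMAS AND PROOFS =====
set_option maxHeartbeats 2000000 in
set_option maxRecDepth 100000 in
theorem fou_eq_alt_on_square :
    ∀ lig ∈ PySem.List.pyRange (-8) 8 1, ∀ col ∈ PySem.List.pyRange (-8) 8 1,
      fou lig col = fou_alt lig col := by decide

-- ===== VERDICT (by name: the statement is the Claim_ definition above) =====
theorem fou_spec : Claim_equal_fou := by
  intro lig col _ hpre
  obtain ⟨h1, h2, h3, h4⟩ := hpre
  exact fou_eq_alt_on_square lig ((PySem.List.mem_pyRange_one).2 ⟨h1, h2⟩)
    col ((PySem.List.mem_pyRange_one).2 ⟨h3, h4⟩)
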